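-- pv_equiv track=rewrite | github.com/MatousVondal/YouTube_API_ETL | youtube_statictics.py | categorize_duration
-- ===== SOURCE A (Python) =====
-- def categorize_duration(duration_values):
--     """
--     Categorize durations into "short", "medium", or "long".
--
--     Args:
--         duration_values (list): List of duration values in seconds.
--
--     Returns:
--         list: List of category labels ("short", "medium", or "long") based on duration values.
--     """
--     short_threshold = 180  # 3 minutes (180 seconds)
--     medium_threshold = 600  # 10 minutes (600 seconds)
--     duration_categories = []
--     for duration in duration_values:
--         if duration < short_threshold:
--             category = "short"
--         elif duration < medium_threshold:
--             category = "medium"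
--         else:
--             category = "long"
--         duration_categories.append(category)
--     return duration_categories
-- ===== SOURCE B (Python) =====
-- import bisect
--
-- THRESHOLDS = [180, 600]
-- LABELS = ["short", "medium", "long"]
--
--
-- def categorize_duration(duration_values):
--     return [LABELS[bisect.bisect_right(THRESHOLDS, d)] for d in duration_values]
-- ===== Notes on version B (the rewrite author's own statement) =====
-- stated objective: idiomatic
-- what changed: Replaces the if/elif/else cascade with a sorted threshold table and a bisect_right index into a parallel labels table, mapping each duration to its label by binary-search lookup.
import Mathlib
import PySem

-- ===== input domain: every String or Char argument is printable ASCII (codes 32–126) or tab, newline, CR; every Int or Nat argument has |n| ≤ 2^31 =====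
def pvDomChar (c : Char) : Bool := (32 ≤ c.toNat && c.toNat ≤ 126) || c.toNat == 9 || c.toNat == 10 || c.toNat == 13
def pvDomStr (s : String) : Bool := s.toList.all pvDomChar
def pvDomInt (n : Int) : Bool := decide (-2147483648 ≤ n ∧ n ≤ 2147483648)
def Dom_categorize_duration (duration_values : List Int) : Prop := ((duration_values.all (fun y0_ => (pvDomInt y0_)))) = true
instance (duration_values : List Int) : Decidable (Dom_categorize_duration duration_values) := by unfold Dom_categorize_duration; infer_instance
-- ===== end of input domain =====

-- B replaces A's if/elif/else cascade with a threshold table + bisect_right index into a labels table (idiomatic; same O(n) cost).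
-- ===== PORT A =====
-- Port of A: foldl over the list appending the if/elif/else label.
def categorize_duration (duration_values : List Int) : List String :=
  duration_values.foldl
    (fun duration_categories duration =>
      duration_categories ++
        [if duration < 180 then "short"
         else if duration < 600 then "medium"
         else "long"])
    []

-- ===== PORT B =====
-- bisect.bisect_right on a sorted list: number of elements ≤ d (its contract).
def pvBisectRight (thresholds : List Int) (d : Int) : Nat :=
  (thresholds.filter (fun t => t ≤ d)).length

-- Port of B: labels[bisect_right(thresholds, d)] for each duration.
def categorize_duration_alt (duration_values : List Int) : List String :=
  duration_values.map (fun d =>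
    (PySem.List.pyGet? ["short", "medium", "long"] ((pvBisectRight [180, 600] d : Nat) : Int)).getD "")

-- ===== PRECONDITION & SPEC =====
def Spec_categorize_duration (duration_values : List Int) (out : List String) : Prop := out = categorize_duration_alt duration_values
instance (duration_values : List Int) (out : List String) : Decidable (Spec_categorize_duration duration_values out) := by unfold Spec_categorize_duration; infer_instance

-- ===== CLAIM (what is proved, stated in full; the proofs are below) =====
def Claim_equal_categorize_duration : Prop := ∀ (duration_values : List Int), Dom_categorize_duration duration_values → Spec_categorize_duration duration_values (categorize_duration duration_values)

-- ===== LEMMAS AND PROOFS =====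

theorem pv_foldl_append (xs : List Int) (f : Int → String) (acc : List String) :
    xs.foldl (fun a d => a ++ [f d]) acc = acc ++ xs.map f := by
  induction xs generalizing acc with
  | nil => simp
  | cons x xs ih => simp [List.foldl, ih]

theorem pv_cell (d : Int) :
    (if d < 180 then "short" else if d < 600 then "medium" else "long")
      = (PySem.List.pyGet? ["short", "medium", "long"] ((pvBisectRight [180, 600] d : Nat) : Int)).getD "" := by
  unfold pvBisectRight
  by_cases h1 : d < 180
  · simp [List.filter, show ¬(180 ≤ d) by omega, show ¬(600 ≤ d) by omega, h1,
      PySem.List.pyGet?, PySem.List.pyIdx?]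
  · by_cases h2 : d < 600
    · simp [List.filter, show (180 ≤ d) by omega, show ¬(600 ≤ d) by omega, h1, h2,
        PySem.List.pyGet?, PySem.List.pyIdx?]
    · simp [List.filter, show (180 ≤ d) by omega, show (600 ≤ d) by omega, h1, h2,
        PySem.List.pyGet?, PySem.List.pyIdx?]

-- ===== VERDICT (by name: the statement is the Claim_ definition above) =====
theorem categorize_duration_spec : Claim_equal_categorize_duration := by
  intro xs _
  unfold Spec_categorize_duration categorize_duration categorize_duration_alt
  rw [pv_foldl_append xs (fun d => if d < 180 then "short" else if d < 600 then "medium" else "long") []]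
  simp only [List.nil_append]
  exact List.map_congr_left (fun d _ => pv_cell d)
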